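-- pv_equiv track=rewrite | github.com/AdroMine/AdventOfCode | 2015/Day17/d17_solution.py | min_pack
-- ===== SOURCE A (Python) =====
-- from collections import defaultdict
-- from typing import List, Dict
--
-- def min_pack(containers: List[int], left: int, contains:int = 0) -> Dict:
--     """
--     Given a set of containers and amount to fill, find the number of ways to fill it
--     along with the number of containers required to fill it
--     """
--     if left == 0:
--         return {contains: 1}
--     composition = defaultdict(int)
--     for i, container in enumerate(containers):
--         if container > left:
--             continue
--         res = min_pack(containers[i+1:], left - container, contains + 1)
--         for pos in res:
--             composition[pos] += res[pos]
--     return composition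
-- ===== SOURCE B (Python) =====
-- def min_pack(containers, left, contains=0):
--     """Memoized recursion over (start index, amount left, containers used) states:
--     each distinct state is computed once."""
--     n = len(containers)
--     memo = {}
--
--     def go(i, left, contains):
--         if left == 0:
--             return {contains: 1}
--         key = (i, left, contains)
--         if key in memo:
--             return memo[key]
--         comp = {}
--         for j in range(i, n):
--             c = containers[j]
--             if c <= left:
--                 sub = go(j + 1, left - c, contains + 1)
--                 for pos, v in sub.items():
--                     comp[pos] = comp.get(pos, 0) + v
--         memo[key] = comp
--         return comp
--
--     return dict(go(0, left, contains))
-- ===== Notes on version B (the rewrite author's own statement) =====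
-- stated objective: alternative
-- what changed: A's plain recursion over list suffixes is replaced by a memoized recursion over (start index, amount left, containers used) states, indexing the list instead of slicing it, so each distinct state is computed once (a big win only when 'left' values repeat, e.g. small positive containers; on arbitrary large ints states rarely repeat).
import Mathlib
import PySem

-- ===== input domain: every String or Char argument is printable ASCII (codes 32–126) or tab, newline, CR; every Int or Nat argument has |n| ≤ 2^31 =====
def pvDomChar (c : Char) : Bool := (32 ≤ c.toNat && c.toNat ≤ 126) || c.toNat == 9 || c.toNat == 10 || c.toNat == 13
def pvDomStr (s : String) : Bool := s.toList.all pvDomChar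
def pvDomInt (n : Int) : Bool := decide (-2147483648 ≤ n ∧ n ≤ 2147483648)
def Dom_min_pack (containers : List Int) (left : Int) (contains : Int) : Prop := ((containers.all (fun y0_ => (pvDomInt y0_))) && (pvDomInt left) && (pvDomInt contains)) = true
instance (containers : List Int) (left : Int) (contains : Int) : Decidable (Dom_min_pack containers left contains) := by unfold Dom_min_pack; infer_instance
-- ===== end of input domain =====

-- B replaces A's recursion over list suffixes by a memoized recursion over
-- (start index, amount left, containers used) states, computing each distinct state once.

-- ===== PORT A =====
-- A: if left == 0 return {contains: 1}; else for each i, container (with container ≤ left)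
-- recurse on containers[i+1:] and add the result's counts into a defaultdict(int).
mutual
def min_pack (containers : List Int) (left : Int) (contains : Int) : List (Int × Int) :=
  if left = 0 then [(contains, 1)]
  else (minPackLoopA containers left contains PySem.Dict.empty).items
termination_by (containers.length, 1)

-- the 'for i, container in enumerate(containers)' loop; the slice containers[i+1:] is 'rest'
def minPackLoopA (cs : List Int) (left : Int) (contains : Int) (acc : PySem.Dict Int Int) :
    PySem.Dict Int Int :=
  match cs with
  | [] => acc
  | c :: rest =>
    if c > left then minPackLoopA rest left contains acc
    else
      minPackLoopA rest left contains
        ((min_pack rest (left - c) (contains + 1)).foldl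
          (fun d p => d.modify p.1 0 (· + p.2)) acc)  -- composition[pos] += res[pos]
termination_by (cs.length, 0)
end

-- ===== PORT B =====
-- B: same results computed once per state (i, left, contains) via a memo dict.
mutual
def minPackGoB (cs : List Int) (n : Nat) (i : Nat) (left : Int) (contains : Int)
    (memo : PySem.Dict (Int × Int × Int) (List (Int × Int))) :
    List (Int × Int) × PySem.Dict (Int × Int × Int) (List (Int × Int)) :=
  if left = 0 then ([(contains, 1)], memo)
  else
    match memo.get? ((i : Int), left, contains) with
    | some v => (v, memo)                                  -- if key in memo: return memo[key]
    | none =>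
      let r := minPackLoopB cs n i left contains PySem.Dict.empty memo
      (r.1.items, r.2.insert ((i : Int), left, contains) r.1.items)  -- memo[key] = comp
termination_by (n - i, 1)

-- 'for j in range(i, n)'
def minPackLoopB (cs : List Int) (n : Nat) (j : Nat) (left : Int) (contains : Int)
    (comp : PySem.Dict Int Int)
    (memo : PySem.Dict (Int × Int × Int) (List (Int × Int))) :
    PySem.Dict Int Int × PySem.Dict (Int × Int × Int) (List (Int × Int)) :=
  if h : j < n then
    let c := cs.getD j 0  -- containers[j]; always in range since the loop guard gives j < n = len
    if c ≤ left then
      let r := minPackGoB cs n (j + 1) (left - c) (contains + 1) memo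
      minPackLoopB cs n (j + 1) left contains
        (r.1.foldl (fun d p => d.insert p.1 (d.getD p.1 0 + p.2)) comp)  -- comp[pos] = comp.get(pos,0)+v
        r.2
    else minPackLoopB cs n (j + 1) left contains comp memo
  else (comp, memo)
termination_by (n - j, 0)
end

def min_pack_alt (containers : List Int) (left : Int) (contains : Int) : List (Int × Int) :=
  (minPackGoB containers containers.length 0 left contains PySem.Dict.empty).1

-- ===== PRECONDITION & SPEC =====
def Spec_min_pack (containers : List Int) (left : Int) (contains : Int) (out : List (Int × Int)) : Prop := out = min_pack_alt containers left contains
instance (containers : List Int) (left : Int) (contains : Int) (out : List (Int × Int)) : Decidable (Spec_min_pack containers left contains out) := by unfold Spec_min_pack; infer_instance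

-- ===== CLAIM (what is proved, stated in full; the proofs are below) =====
def Claim_equal_min_pack : Prop := ∀ (containers : List Int) (left : Int) (contains : Int), Dom_min_pack containers left contains → Spec_min_pack containers left contains (min_pack containers left contains)

-- ===== LEMMAS AND PROOFS =====

-- memo invariant: every stored entry is A's answer for the corresponding suffix
def MemoInv (cs : List Int) (memo : PySem.Dict (Int × Int × Int) (List (Int × Int))) : Prop :=
  ∀ (j : Nat) (l c : Int) (v : List (Int × Int)),
    memo.get? ((j : Int), l, c) = some v → v = min_pack (cs.drop j) l c

-- the two inner accumulation loops ('composition[pos] += v' via defaultdict vs '.get(pos, 0) + v')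
-- compute the same dict
lemma merge_eq (res : List (Int × Int)) (acc : PySem.Dict Int Int) :
    res.foldl (fun d p => d.insert p.1 (d.getD p.1 0 + p.2)) acc
      = res.foldl (fun d p => d.modify p.1 0 (· + p.2)) acc := rfl

lemma loopB_correct (cs : List Int) (k : Nat)
    (HG : ∀ (i' : Nat) (l' c' : Int) m', cs.length - i' < k → MemoInv cs m' →
      (minPackGoB cs cs.length i' l' c' m').1 = min_pack (cs.drop i') l' c'
        ∧ MemoInv cs (minPackGoB cs cs.length i' l' c' m').2) :
    ∀ (fuel j : Nat), cs.length - j ≤ fuel → cs.length - j ≤ k →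
      ∀ (left contains : Int) comp memo, MemoInv cs memo →
      (minPackLoopB cs cs.length j left contains comp memo).1
          = minPackLoopA (cs.drop j) left contains comp
        ∧ MemoInv cs (minPackLoopB cs cs.length j left contains comp memo).2 := by
  intro fuel
  induction fuel with
  | zero =>
    intro j hf hk left contains comp memo hmemo
    have hj : ¬ j < cs.length := by omega
    rw [minPackLoopB, List.drop_eq_nil_of_le (by omega), minPackLoopA]
    simp [hj, hmemo]
  | succ fuel IH =>
    intro j hf hk left contains comp memo hmemo
    by_cases hj : j < cs.length
    · rw [minPackLoopB]
      rw [List.drop_eq_getElem_cons hj, minPackLoopA]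
      simp only [hj, dite_true]
      have hc : cs.getD j 0 = cs[j] := List.getD_eq_getElem cs 0 hj
      by_cases hle : cs[j] ≤ left
      · have hg := HG (j + 1) (left - cs[j]) (contains + 1) memo (by omega) hmemo
        simp only [hc, hle, if_true, not_lt.mpr hle, if_false, hg.1, merge_eq]
        exact IH (j + 1) (by omega) (by omega) left contains _ _ hg.2
      · simp only [hc, hle, if_false, lt_of_not_ge hle, if_true]
        exact IH (j + 1) (by omega) (by omega) left contains comp memo hmemo
    · rw [minPackLoopB, List.drop_eq_nil_of_le (by omega), minPackLoopA]
      simp [hj, hmemo]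

lemma goB_correct (cs : List Int) :
    ∀ k : Nat, ∀ (i : Nat) (left contains : Int) memo,
      cs.length - i < k → MemoInv cs memo →
      (minPackGoB cs cs.length i left contains memo).1 = min_pack (cs.drop i) left contains
        ∧ MemoInv cs (minPackGoB cs cs.length i left contains memo).2 := by
  intro k
  induction k with
  | zero => intro i left contains memo hk; omega
  | succ k IH =>
    intro i left contains memo hk hmemo
    rw [minPackGoB]
    by_cases hl : left = 0
    · rw [min_pack]
      simp [hl, hmemo]
    · simp only [hl, if_false]
      cases hget : memo.get? ((i : Int), left, contains) with
      | some v =>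
        refine ⟨?_, hmemo⟩
        exact hmemo i left contains v hget
      | none =>
        have hloop := loopB_correct cs k IH cs.length i (by omega) (by omega)
          left contains PySem.Dict.empty memo hmemo
        have hval : (minPackLoopB cs cs.length i left contains PySem.Dict.empty memo).1.items
            = min_pack (cs.drop i) left contains := by
          rw [min_pack]
          simp [hl, hloop.1]
        refine ⟨hval, ?_⟩
        intro j' l' c' v hv
        rw [PySem.Dict.get?_insert] at hv
        by_cases he : ((j' : Int), l', c') = ((i : Int), left, contains)
        · rw [if_pos he] at hv
          obtain ⟨h1, h2, h3⟩ : (j' : Int) = (i : Int) ∧ l' = left ∧ c' = contains := by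
            simpa using he
          have hji : j' = i := by exact_mod_cast h1
          subst hji; subst h2; subst h3
          cases hv
          exact hval
        · rw [if_neg he] at hv
          exact hloop.2 j' l' c' v hv

theorem min_pack_eq_alt (containers : List Int) (left contains : Int) :
    min_pack containers left contains = min_pack_alt containers left contains := by
  have h := goB_correct containers (containers.length + 1) 0 left contains PySem.Dict.empty
    (by omega) (by intro j l c v hv; simp [PySem.Dict.get?_empty] at hv)
  simpa [min_pack_alt] using h.1.symm

-- ===== VERDICT (by name: the statement is the Claim_ definition above) =====
theorem min_pack_spec : Claim_equal_min_pack := by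
  intro containers left contains _
  unfold Spec_min_pack
  exact min_pack_eq_alt containers left contains
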